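-- pv_equiv track=rewrite | github.com/sofyasukh/maze_game | models/maze.py | straight_line
-- ===== SOURCE A (Python) =====
-- def straight_line(a, b):
--     """Возвращает клетки прямой линии между двумя точками (манхэттен)"""
--     path = []
--     r, c = a
--     r2, c2 = b
--     while (r, c) != (r2, c2):
--         path.append((r, c))
--         if r != r2:
--             r += 1 if r2 > r else -1
--         elif c != c2:
--             c += 1 if c2 > c else -1
--     path.append((r2, c2))
--     return path
-- ===== SOURCE B (Python) =====
-- def straight_line(a, b):
--     """Same L-shaped Manhattan path, built from two explicit range segments."""
--     (r, c), (r2, c2) = a, b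
--     dr = 1 if r2 >= r else -1
--     dc = 1 if c2 >= c else -1
--     vertical = [(x, c) for x in range(r, r2 + dr, dr)]
--     horizontal = [(r2, y) for y in range(c + dc, c2 + dc, dc)]
--     return vertical + horizontal
-- ===== Notes on version B (the rewrite author's own statement) =====
-- stated objective: idiomatic
-- what changed: Replaced the step-by-step mutating while-loop by two declarative range-based segments (vertical run, then horizontal run excluding the corner) concatenated.
import Mathlib
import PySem

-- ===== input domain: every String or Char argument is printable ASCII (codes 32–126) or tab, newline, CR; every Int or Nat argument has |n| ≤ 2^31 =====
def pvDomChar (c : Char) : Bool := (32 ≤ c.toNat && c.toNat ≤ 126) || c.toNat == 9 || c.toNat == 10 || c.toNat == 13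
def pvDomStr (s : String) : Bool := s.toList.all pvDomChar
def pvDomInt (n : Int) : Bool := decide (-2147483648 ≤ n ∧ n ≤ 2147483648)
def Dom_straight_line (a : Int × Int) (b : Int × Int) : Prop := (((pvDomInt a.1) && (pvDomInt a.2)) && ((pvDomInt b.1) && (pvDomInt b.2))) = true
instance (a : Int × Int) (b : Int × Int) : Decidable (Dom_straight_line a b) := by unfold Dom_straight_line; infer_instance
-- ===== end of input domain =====

-- B replaces A's step-by-step mutating while-loop by two declarative range-based
-- segments (vertical run, then horizontal run excluding the corner); idiomatic, same cost.


-- ===== PORT A =====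
-- the while-loop of A, as structural recursion on the Manhattan distance
def slLoop (r c r2 c2 : Int) (path : List (Int × Int)) : List (Int × Int) :=
  if (r, c) ≠ (r2, c2) then
    let path' := path ++ [(r, c)]
    if r ≠ r2 then
      slLoop (r + (if r2 > r then 1 else -1)) c r2 c2 path'
    else if c ≠ c2 then
      slLoop r (c + (if c2 > c then 1 else -1)) r2 c2 path'
    else path'  -- unreachable: (r,c) ≠ (r2,c2) forces r ≠ r2 or c ≠ c2
  else path ++ [(r2, c2)]
  termination_by ((r2 - r).natAbs + (c2 - c).natAbs)
  decreasing_by all_goals (simp_all; omega)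

def straight_line (a : Int × Int) (b : Int × Int) : List (Int × Int) :=
  slLoop a.1 a.2 b.1 b.2 []

-- ===== PORT B =====
def straight_line_alt (a : Int × Int) (b : Int × Int) : List (Int × Int) :=
  let r := a.1; let c := a.2; let r2 := b.1; let c2 := b.2
  let dr : Int := if r2 ≥ r then 1 else -1
  let dc : Int := if c2 ≥ c then 1 else -1
  let vertical := (PySem.List.pyRange r (r2 + dr) dr).map (fun x => (x, c))
  let horizontal := (PySem.List.pyRange (c + dc) (c2 + dc) dc).map (fun y => (r2, y))
  vertical ++ horizontal

-- ===== PRECONDITION & SPEC =====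
def Spec_straight_line (a : Int × Int) (b : Int × Int) (out : List (Int × Int)) : Prop := out = straight_line_alt a b
instance (a : Int × Int) (b : Int × Int) (out : List (Int × Int)) : Decidable (Spec_straight_line a b out) := by unfold Spec_straight_line; infer_instance

-- ===== CLAIM (what is proved, stated in full; the proofs are below) =====
def Claim_equal_straight_line : Prop := ∀ (a : Int × Int) (b : Int × Int), Dom_straight_line a b → Spec_straight_line a b (straight_line a b)

-- ===== LEMMAS AND PROOFS =====

-- B's value, as a function of the four coordinates
def seg (r c r2 c2 : Int) : List (Int × Int) :=
  ((PySem.List.pyRange r (r2 + (if r2 ≥ r then 1 else -1)) (if r2 ≥ r then 1 else -1)).map (fun x => (x, c)))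
  ++ ((PySem.List.pyRange (c + (if c2 ≥ c then 1 else -1)) (c2 + (if c2 ≥ c then 1 else -1)) (if c2 ≥ c then 1 else -1)).map (fun y => (r2, y)))

theorem seg_base (r2 c2 : Int) : seg r2 c2 r2 c2 = [(r2, c2)] := by
  simp [seg, PySem.List.pyRange_one_singleton, PySem.List.pyRange_one_eq_nil (by omega : c2 + 1 ≤ c2 + 1)]

theorem seg_vstep (r c r2 c2 : Int) (h : r ≠ r2) :
    seg r c r2 c2 = (r, c) :: seg (r + if r2 > r then 1 else -1) c r2 c2 := by
  unfold seg
  by_cases hlt : r2 > r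
  · rw [if_pos hlt, if_pos (show r2 ≥ r by omega), if_pos (show r2 ≥ r + 1 by omega),
      PySem.List.pyRange_one_cons (by omega)]
    simp
  · have hgt : r2 < r := by omega
    rw [if_neg hlt, if_neg (show ¬ r2 ≥ r by omega),
      PySem.List.pyRange_neg_one_cons (by omega)]
    by_cases he : r2 ≥ r + -1
    · have h1 : r2 = r - 1 := by omega
      rw [if_pos he, PySem.List.pyRange_neg_one_cons (by omega),
        PySem.List.pyRange_neg_one_eq_nil (by omega),
        show r2 + 1 = (r + -1) + 1 by omega, PySem.List.pyRange_one_singleton]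
      simp [show r + -1 = r - 1 from by omega, h1]
    · rw [if_neg he]
      simp [show r - 1 = r + -1 from by omega]

theorem seg_hstep (c r2 c2 : Int) (h : c ≠ c2) :
    seg r2 c r2 c2 = (r2, c) :: seg r2 (c + if c2 > c then 1 else -1) r2 c2 := by
  unfold seg
  rw [if_pos (show r2 ≥ r2 by omega), PySem.List.pyRange_one_singleton]
  by_cases hlt : c2 > c
  · rw [if_pos hlt, if_pos (show c2 ≥ c by omega), if_pos (show c2 ≥ c + 1 by omega),
      PySem.List.pyRange_one_cons (by omega)]
    simp
  · have hgt : c2 < c := by omega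
    rw [if_neg hlt, if_neg (show ¬ c2 ≥ c by omega),
      PySem.List.pyRange_neg_one_cons (by omega)]
    by_cases he : c2 ≥ c + -1
    · have h1 : c2 = c - 1 := by omega
      rw [if_pos he, show c2 + 1 = (c + -1) + 1 by omega,
        PySem.List.pyRange_one_eq_nil (by omega),
        PySem.List.pyRange_neg_one_eq_nil (by omega)]
      simp [show c + -1 = c - 1 from by omega]
    · rw [if_neg he]
      simp [show c + -1 - 1 = c + -1 + -1 from by omega]

theorem slLoop_eq_seg (r c r2 c2 : Int) (path : List (Int × Int)) :
    slLoop r c r2 c2 path = path ++ seg r c r2 c2 := by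
  fun_induction slLoop with
  | case1 a b p hne pa hr ih =>
    rw [seg_vstep a b _ _ hr]
    simpa [show pa = p ++ [(a, b)] from rfl] using ih
  | case2 a b p hne pa hr hc ih =>
    have ha : a = r2 := by omega
    subst ha
    rw [seg_hstep b _ _ hc]
    simpa [show pa = p ++ [(a, b)] from rfl] using ih
  | case3 a b p hne pa hr hc =>
    exact absurd (by simp_all) hne
  | case4 a b p hne =>
    have h1 : a = r2 ∧ b = c2 := by simpa using hne
    rw [h1.1, h1.2, seg_base]

theorem straight_line_spec : Claim_equal_straight_line := by
  intro a b _
  show straight_line a b = straight_line_alt a b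
  simpa [straight_line, straight_line_alt, seg] using
    slLoop_eq_seg a.1 a.2 b.1 b.2 []
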